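-- pv_equiv track=rewrite | github.com/jancramer/morphemepiece | statistical_evaluation/stats_evaluation.py | word_boundary_mask
-- ===== SOURCE A (Python) =====
-- def word_boundary_mask(tokens):
--     word_counter = 0
--     result = []
--     for i in range(len(tokens) - 1):
--         current_t = tokens[i]
--         next_t = tokens[i + 1]
--         result.append(word_counter)
--
--         if current_t == '##' or current_t.endswith("##"):
--             continue
--
--         if not next_t.startswith("##"):
--             word_counter += 1
--
--     result.append(word_counter)
--
--     assert len(tokens) == len(result)
--
--     return result
-- ===== SOURCE B (Python) =====
-- def word_boundary_mask(tokens):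
--     # Segment construction: find the word-cut positions once, then build the
--     # mask as a concatenation of constant blocks [w] * segment_length.
--     n = len(tokens)
--     cuts = [i + 1 for i in range(n - 1)
--             if not tokens[i].endswith("##") and not tokens[i + 1].startswith("##")]
--     bounds = [0] + cuts + [n]
--     result = []
--     for w, (lo, hi) in enumerate(zip(bounds, bounds[1:])):
--         result += [w] * (hi - lo)
--     assert len(tokens) == len(result)
--     return result
-- ===== Notes on version B (the rewrite author's own statement) =====
-- stated objective: alternative
-- what changed: B never maintains a per-token running counter: it first finds the word-cut positions, then constructs the mask as a concatenation of constant blocks [w]*(segment length) over the segments between consecutive cuts; A scans tokens once, appending a counter it increments at boundaries.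
-- outside the precondition, e.g. on word_boundary_mask([]): A raises AssertionError, B returns []
import Mathlib
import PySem

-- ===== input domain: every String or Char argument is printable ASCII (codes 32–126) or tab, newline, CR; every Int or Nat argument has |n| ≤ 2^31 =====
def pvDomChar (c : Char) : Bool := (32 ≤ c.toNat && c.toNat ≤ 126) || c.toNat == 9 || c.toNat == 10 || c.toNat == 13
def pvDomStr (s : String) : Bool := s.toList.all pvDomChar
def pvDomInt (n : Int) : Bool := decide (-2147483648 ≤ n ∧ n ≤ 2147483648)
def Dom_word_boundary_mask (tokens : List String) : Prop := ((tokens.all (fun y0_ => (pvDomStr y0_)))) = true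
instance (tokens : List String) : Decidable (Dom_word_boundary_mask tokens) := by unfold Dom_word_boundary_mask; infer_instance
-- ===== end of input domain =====

-- B builds the mask by segments: it computes the word-cut positions once, then emits a
-- constant block [w]*(segment length) per segment; A scans with a running counter.

-- ===== PORT A =====
def word_boundary_mask (tokens : List String) : List Int :=
  let step := fun (st : Int × List Int) (i : Int) =>
    let current_t := PySem.List.pyGetD tokens i ""
    let next_t := PySem.List.pyGetD tokens (i + 1) ""
    let result := st.2 ++ [st.1]
    if current_t == "##" || PySem.Str.endswith current_t "##" then (st.1, result)
    else if !(PySem.Str.startswith next_t "##") then (st.1 + 1, result)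
    else (st.1, result)
  let st := (PySem.List.pyRange 0 ((tokens.length : Int) - 1) 1).foldl step (0, [])
  -- the trailing 'assert len(tokens) == len(result)' holds for every nonempty tokens
  -- and fails (AssertionError) exactly on tokens = []; Pre_ excludes that input
  st.2 ++ [st.1]

-- ===== PORT B =====
def word_boundary_mask_alt (tokens : List String) : List Int :=
  let n : Int := tokens.length
  let cuts := ((PySem.List.pyRange 0 (n - 1) 1).filter (fun i =>
      !PySem.Str.endswith (PySem.List.pyGetD tokens i "") "##" &&
      !PySem.Str.startswith (PySem.List.pyGetD tokens (i + 1) "") "##")).map (fun i => i + 1)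
  let bounds := [(0 : Int)] ++ cuts ++ [n]
  -- for w, (lo, hi) in enumerate(zip(bounds, bounds[1:])): result += [w] * (hi - lo)
  (PySem.List.enumerate (bounds.zip (bounds.drop 1)) 0).foldl
    (fun acc (q : Int × Int × Int) => acc ++ PySem.List.pyRepeat [q.1] (q.2.2 - q.2.1)) []
  -- B's 'assert len(tokens) == len(result)' always holds here (on [] B returns [])

-- ===== PRECONDITION & SPEC =====
-- Pre_ excludes only tokens = [], where A's assert fails (AssertionError); B returns [] there.
def Pre_word_boundary_mask (tokens : List String) : Prop := tokens ≠ []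
instance (tokens : List String) : Decidable (Pre_word_boundary_mask tokens) := by unfold Pre_word_boundary_mask; infer_instance
def pvWitness_word_boundary_mask : List String := (["he", "##llo", "world"])

def Spec_word_boundary_mask (tokens : List String) (out : List Int) : Prop := out = word_boundary_mask_alt tokens
instance (tokens : List String) (out : List Int) : Decidable (Spec_word_boundary_mask tokens out) := by unfold Spec_word_boundary_mask; infer_instance

-- ===== CLAIM (what is proved, stated in full; the proofs are below) =====
def Claim_equal_word_boundary_mask : Prop := ∀ (tokens : List String), Dom_word_boundary_mask tokens → Pre_word_boundary_mask tokens → Spec_word_boundary_mask tokens (word_boundary_mask tokens)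

-- ===== LEMMAS AND PROOFS =====

-- the per-boundary increment both programs test
def pvInc (a b : String) : Int :=
  if !PySem.Str.endswith a "##" && !PySem.Str.startswith b "##" then 1 else 0

def pvIncs (ts : List String) : List Int :=
  (ts.zip (ts.drop 1)).map (fun p => pvInc p.1 p.2)

-- reference description of A's mask starting at counter c
def pvMask : Int → List String → List Int
  | _, [] => []
  | c, [_] => [c]
  | c, a :: b :: rest => c :: pvMask (c + pvInc a b) (b :: rest)

-- cut positions of an increment list, offset p
def pvCuts : Int → List Int → List Int
  | _, [] => []
  | p, i :: r => if i = 1 then (p + 1) :: pvCuts (p + 1) r else pvCuts (p + 1) r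

-- B's block construction: emit word id w from position p to the next cut, then recurse
def pvFill : Int → Int → List Int → Int → List Int
  | w, p, [], n => List.replicate (n - p).toNat w
  | w, p, c :: r, n => List.replicate (c - p).toNat w ++ pvFill (w + 1) c r n

lemma pvInc_eq_A (a b : String) :
    (if a == "##" || PySem.Str.endswith a "##" then (0 : Int)
     else if !(PySem.Str.startswith b "##") then 1 else 0) = pvInc a b := by
  unfold pvInc
  by_cases h : a = "##"
  · subst h
    have he : PySem.Chars.endswith ['#', '#'] ['#', '#'] = true := by decide
    simp [he]
  · by_cases he : PySem.Chars.endswith a.toList ['#', '#'] <;>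
      by_cases hs : PySem.Chars.startswith b.toList ['#', '#'] <;>
      simp [h, he, hs]

-- one iteration of A's loop body equals "append the old counter, add the increment"
lemma pvStep_eq (a b : String) (c : Int) (acc : List Int) :
    (if (a == "##" || PySem.Str.endswith a "##") = true then (c, acc ++ [c])
     else if (!PySem.Str.startswith b "##") = true then (c + 1, acc ++ [c])
     else (c, acc ++ [c])) = (c + pvInc a b, acc ++ [c]) := by
  rw [← pvInc_eq_A a b]
  by_cases h : a = "##"
  · subst h
    have he : PySem.Chars.endswith ['#', '#'] ['#', '#'] = true := by decide
    simp [he]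
  · by_cases he : PySem.Chars.endswith a.toList ['#', '#'] <;>
      by_cases hs : PySem.Chars.startswith b.toList ['#', '#'] <;>
      simp [h, he, hs]

-- A's fold over pyRange k (len-1) 1, characterized against pvMask of the k-suffix
lemma A_fold (tokens : List String) (k : Nat) (hk : k < tokens.length) (c : Int) (acc : List Int) :
    (let st := (PySem.List.pyRange (k : Int) ((tokens.length : Int) - 1) 1).foldl
      (fun (st : Int × List Int) (i : Int) =>
        let current_t := PySem.List.pyGetD tokens i ""
        let next_t := PySem.List.pyGetD tokens (i + 1) ""
        let result := st.2 ++ [st.1]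
        if current_t == "##" || PySem.Str.endswith current_t "##" then (st.1, result)
        else if !(PySem.Str.startswith next_t "##") then (st.1 + 1, result)
        else (st.1, result)) (c, acc)
     st.2 ++ [st.1]) = acc ++ pvMask c (tokens.drop k) := by
  induction hn : tokens.length - k generalizing k c acc with
  | zero => omega
  | succ n ih =>
    by_cases hlast : k + 1 = tokens.length
    · have hr : PySem.List.pyRange (k : Int) ((tokens.length : Int) - 1) 1 = [] := by
        apply PySem.List.pyRange_one_eq_nil; omega
      have hd : tokens.drop k = [tokens[k]] := by
        rw [List.drop_eq_getElem_cons hk, List.drop_eq_nil_iff.mpr (by omega)]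
      simp [hr, hd, pvMask]
    · have hk1 : k + 1 < tokens.length := by omega
      have hr : PySem.List.pyRange (k : Int) ((tokens.length : Int) - 1) 1
          = (k : Int) :: PySem.List.pyRange ((k : Int) + 1) ((tokens.length : Int) - 1) 1 := by
        apply PySem.List.pyRange_one_cons; omega
      have hg1 : PySem.List.pyGetD tokens (k : Int) "" = tokens[k] := by
        rw [PySem.List.pyGetD_natCast, List.getD_eq_getElem?_getD, List.getElem?_eq_getElem hk,
          Option.getD_some]
      have hg2 : PySem.List.pyGetD tokens ((k : Int) + 1) "" = tokens[k + 1] := by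
        have h := PySem.List.pyGetD_natCast tokens (k + 1) ""
        push_cast at h
        rw [h, List.getD_eq_getElem?_getD, List.getElem?_eq_getElem hk1, Option.getD_some]
      have hd : tokens.drop k = tokens[k] :: tokens[k + 1] :: tokens.drop (k + 2) := by
        rw [List.drop_eq_getElem_cons hk, List.drop_eq_getElem_cons hk1]
      have hd1 : tokens.drop (k + 1) = tokens[k + 1] :: tokens.drop (k + 2) :=
        List.drop_eq_getElem_cons hk1
      simp only [hr, List.foldl_cons, hg1, hg2]
      rw [pvStep_eq tokens[k] tokens[k + 1] c acc]
      have key := ih (k + 1) hk1 (c + pvInc tokens[k] tokens[k + 1]) (acc ++ [c]) (by omega)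
      simp only [hd1] at key
      push_cast at key
      simp only [key, hd, pvMask]
      simp

-- the filter predicate of B's comprehension at index k is 'pvInc tokens[k] tokens[k+1] = 1'
lemma pred_eq_inc (a b : String) :
    (!PySem.Str.endswith a "##" && !PySem.Str.startswith b "##") = (pvInc a b == 1) := by
  unfold pvInc
  by_cases he : PySem.Chars.endswith a.toList ['#', '#'] <;>
    by_cases hs : PySem.Chars.startswith b.toList ['#', '#'] <;> simp [he, hs]

-- B's comprehension over pyRange k (len-1) 1, characterized against pvCuts of the k-suffix
lemma cuts_fold (tokens : List String) (k : Nat) (hk : k < tokens.length) :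
    ((PySem.List.pyRange (k : Int) ((tokens.length : Int) - 1) 1).filter (fun i =>
        !PySem.Str.endswith (PySem.List.pyGetD tokens i "") "##" &&
        !PySem.Str.startswith (PySem.List.pyGetD tokens (i + 1) "") "##")).map (fun i => i + 1)
      = pvCuts (k : Int) (pvIncs (tokens.drop k)) := by
  induction hn : tokens.length - k generalizing k with
  | zero => omega
  | succ n ih =>
    by_cases hlast : k + 1 = tokens.length
    · have hr : PySem.List.pyRange (k : Int) ((tokens.length : Int) - 1) 1 = [] := by
        apply PySem.List.pyRange_one_eq_nil; omega
      have hd : tokens.drop k = [tokens[k]] := by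
        rw [List.drop_eq_getElem_cons hk, List.drop_eq_nil_iff.mpr (by omega)]
      simp [hr, hd, pvIncs, pvCuts]
    · have hk1 : k + 1 < tokens.length := by omega
      have hr : PySem.List.pyRange (k : Int) ((tokens.length : Int) - 1) 1
          = (k : Int) :: PySem.List.pyRange ((k : Int) + 1) ((tokens.length : Int) - 1) 1 := by
        apply PySem.List.pyRange_one_cons; omega
      have hg1 : PySem.List.pyGetD tokens (k : Int) "" = tokens[k] := by
        rw [PySem.List.pyGetD_natCast, List.getD_eq_getElem?_getD, List.getElem?_eq_getElem hk,
          Option.getD_some]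
      have hg2 : PySem.List.pyGetD tokens ((k : Int) + 1) "" = tokens[k + 1] := by
        have h := PySem.List.pyGetD_natCast tokens (k + 1) ""
        push_cast at h
        rw [h, List.getD_eq_getElem?_getD, List.getElem?_eq_getElem hk1, Option.getD_some]
      have hd : tokens.drop k = tokens[k] :: tokens[k + 1] :: tokens.drop (k + 2) := by
        rw [List.drop_eq_getElem_cons hk, List.drop_eq_getElem_cons hk1]
      have hd1 : tokens.drop (k + 1) = tokens[k + 1] :: tokens.drop (k + 2) :=
        List.drop_eq_getElem_cons hk1
      have hinc : pvIncs (tokens.drop k)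
          = pvInc tokens[k] tokens[k + 1] :: pvIncs (tokens.drop (k + 1)) := by
        unfold pvIncs
        rw [hd, hd1]
        simp only [List.drop_succ_cons, List.drop_zero, List.zip_cons_cons, List.map_cons]
      have key := ih (k + 1) hk1 (by omega)
      push_cast at key
      simp only [pred_eq_inc] at key
      rw [hr, hinc]
      simp only [List.filter_cons, hg1, hg2, pred_eq_inc]
      by_cases h1 : pvInc tokens[k] tokens[k + 1] = 1
      · simp [h1, pvCuts, key]
      · simp [h1, pvCuts, key]

-- B's block-emitting fold over the enumerated bound pairs equals pvFill
lemma fill_fold (cs : List Int) (p n s : Int) (acc : List Int) :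
    (PySem.List.enumerate ((p :: (cs ++ [n])).zip (cs ++ [n])) s).foldl
      (fun acc (q : Int × Int × Int) => acc ++ PySem.List.pyRepeat [q.1] (q.2.2 - q.2.1)) acc
    = acc ++ pvFill s p cs n := by
  induction cs generalizing p s acc with
  | nil =>
    simp [PySem.List.enumerate_cons, PySem.List.enumerate_nil, pvFill,
      PySem.List.pyRepeat_singleton]
  | cons c r ih =>
    simp only [List.cons_append, List.zip_cons_cons, PySem.List.enumerate_cons, List.foldl_cons]
    rw [ih c (s + 1) (acc ++ PySem.List.pyRepeat [s] (c - p))]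
    simp [pvFill, PySem.List.pyRepeat_singleton]

-- shifting start, cuts and end by 1 leaves the blocks unchanged
lemma fill_shift (cs : List Int) (w p n : Int) :
    pvFill w (p + 1) (cs.map (fun x => x + 1)) (n + 1) = pvFill w p cs n := by
  induction cs generalizing w p with
  | nil => simp only [List.map_nil, pvFill]; congr 1; omega
  | cons c r ih =>
    simp only [List.map_cons, pvFill, ih (w + 1) c]
    congr 2; omega

lemma cuts_shift (l : List Int) (p : Int) :
    pvCuts (p + 1) l = (pvCuts p l).map (fun x => x + 1) := by
  induction l generalizing p with
  | nil => simp [pvCuts]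
  | cons i r ih =>
    by_cases h : i = 1 <;> simp [pvCuts, h, ih (p + 1), ih p]

lemma fill_shift1 (cs : List Int) (w n : Int) :
    pvFill w 1 (cs.map (fun x => x + 1)) (n + 1) = pvFill w 0 cs n := by
  have := fill_shift cs w 0 n
  simpa using this

lemma cuts_shift1 (l : List Int) :
    pvCuts 1 l = (pvCuts 0 l).map (fun x => x + 1) := by
  have := cuts_shift l 0
  simpa using this

lemma cuts_pos (l : List Int) (p : Int) : ∀ x ∈ pvCuts p l, p < x := by
  induction l generalizing p with
  | nil => simp [pvCuts]
  | cons i r ih =>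
    intro x hx
    by_cases h : i = 1 <;> simp [pvCuts, h] at hx
    · rcases hx with rfl | hx
      · omega
      · have := ih (p + 1) x hx; omega
    · have := ih (p + 1) x hx; omega

-- prepending a non-boundary position: one more copy of the current word id in front
lemma fill_cons_zero (cl : List Int) (c n : Int) (hn : 0 ≤ n)
    (hcl : ∀ x ∈ cl, 0 ≤ x) :
    pvFill c 0 (cl.map (fun x => x + 1)) (n + 1) = c :: pvFill c 0 cl n := by
  cases cl with
  | nil =>
    simp only [List.map_nil, pvFill]
    rw [show (n + 1 - 0).toNat = (n - 0).toNat + 1 by omega]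
    simp [List.replicate_succ]
  | cons d r =>
    have hd : 0 ≤ d := hcl d (by simp)
    simp only [List.map_cons, pvFill]
    rw [fill_shift r (c + 1) d n,
      show (d + 1 - 0).toNat = (d - 0).toNat + 1 by omega]
    simp [List.replicate_succ]

-- main bridge: B's segment construction equals A's mask, for every start counter
lemma fill_eq_mask (ts : List String) (hts : ts ≠ []) (c : Int) :
    pvFill c 0 (pvCuts 0 (pvIncs ts)) (ts.length : Int) = pvMask c ts := by
  induction ts generalizing c with
  | nil => exact absurd rfl hts
  | cons a rest ih =>
    cases rest with
    | nil => simp [pvIncs, pvCuts, pvFill, pvMask]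
    | cons b r =>
      have hincs : pvIncs (a :: b :: r) = pvInc a b :: pvIncs (b :: r) := by
        simp [pvIncs]
      have hlen : ((a :: b :: r).length : Int) = ((b :: r).length : Int) + 1 := by
        simp
      rw [hincs, hlen]
      by_cases h1 : pvInc a b = 1
      · have hc : pvCuts 0 (1 :: pvIncs (b :: r))
            = 1 :: (pvCuts 0 (pvIncs (b :: r))).map (fun x => x + 1) := by
          simp [pvCuts, cuts_shift1]
        rw [h1, hc]
        simp only [pvFill]
        rw [fill_shift1, show ((1 : Int) - 0).toNat = 1 by omega]
        rw [ih (by simp) (c + 1)]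
        simp [pvMask, h1]
      · have h0 : pvInc a b = 0 := by
          unfold pvInc at h1 ⊢; split <;> simp_all
        have hc : pvCuts 0 (0 :: pvIncs (b :: r))
            = (pvCuts 0 (pvIncs (b :: r))).map (fun x => x + 1) := by
          simp [pvCuts, cuts_shift1]
        rw [h0, hc, fill_cons_zero _ _ _ (by positivity)
          (fun x hx => le_of_lt (cuts_pos _ 0 x hx))]
        rw [ih (by simp) c]
        simp [pvMask, h0]

-- ===== VERDICT (by name: the statement is the Claim_ definition above) =====
theorem word_boundary_mask_spec : Claim_equal_word_boundary_mask := by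
  intro tokens _hdom hpre
  unfold Spec_word_boundary_mask word_boundary_mask word_boundary_mask_alt
  have hlen : 0 < tokens.length := List.length_pos_iff.mpr hpre
  have hA := A_fold tokens 0 hlen 0 []
  simp only [Nat.cast_zero, List.drop_zero] at hA
  rw [hA]
  have hC := cuts_fold tokens 0 hlen
  simp only [Nat.cast_zero, List.drop_zero] at hC
  simp only []
  rw [hC]
  rw [show ([(0 : Int)] ++ pvCuts 0 (pvIncs tokens) ++ [(tokens.length : Int)])
      = (0 : Int) :: (pvCuts 0 (pvIncs tokens) ++ [(tokens.length : Int)]) by simp,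
    show ((0 : Int) :: (pvCuts 0 (pvIncs tokens) ++ [(tokens.length : Int)])).drop 1
      = pvCuts 0 (pvIncs tokens) ++ [(tokens.length : Int)] by simp]
  rw [fill_fold (pvCuts 0 (pvIncs tokens)) 0 (tokens.length : Int) 0 []]
  rw [fill_eq_mask tokens hpre 0]
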